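-- pv_equiv track=rewrite | github.com/ABrain-One/nn-dup | ab/chatprep/prompt_builder.py | _verify_no_overlap
-- ===== SOURCE A (Python) =====
-- from typing import Dict, Any, List, Optional, Tuple
--
-- def _verify_no_overlap(train: List[dict], dev: List[dict], test: List[dict]) -> Dict[str, int]:
--     """Verify zero overlap between splits by checking source_path intersections."""
--     train_sources = {item.get("meta", {}).get("source_path") for item in train}
--     dev_sources = {item.get("meta", {}).get("source_path") for item in dev}
--     test_sources = {item.get("meta", {}).get("source_path") for item in test}
--
--     train_dev_overlap = len(train_sources & dev_sources)
--     train_test_overlap = len(train_sources & test_sources)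
--     dev_test_overlap = len(dev_sources & test_sources)
--
--     return {
--         "train_dev_overlap": train_dev_overlap,
--         "train_test_overlap": train_test_overlap,
--         "dev_test_overlap": dev_test_overlap
--     }
-- ===== SOURCE B (Python) =====
-- def _verify_no_overlap(train, dev, test):
--     """Verify zero overlap between splits via one inverted index pass."""
--     occ = {}
--     for split, items in (("train", train), ("dev", dev), ("test", test)):
--         for item in items:
--             key = item.get("meta", {}).get("source_path")
--             occ.setdefault(key, set()).add(split)
--     td = tt = dt = 0
--     for splits in occ.values():
--         if "train" in splits and "dev" in splits:
--             td += 1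
--         if "train" in splits and "test" in splits:
--             tt += 1
--         if "dev" in splits and "test" in splits:
--             dt += 1
--     return {
--         "train_dev_overlap": td,
--         "train_test_overlap": tt,
--         "dev_test_overlap": dt
--     }
-- ===== Notes on version B (the rewrite author's own statement) =====
-- stated objective: alternative
-- what changed: Replaces three materialised per-split source sets and three pairwise set intersections by a single inverted index (source_path -> set of split names) built in one pass, followed by one tally pass over its values.
import Mathlib
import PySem

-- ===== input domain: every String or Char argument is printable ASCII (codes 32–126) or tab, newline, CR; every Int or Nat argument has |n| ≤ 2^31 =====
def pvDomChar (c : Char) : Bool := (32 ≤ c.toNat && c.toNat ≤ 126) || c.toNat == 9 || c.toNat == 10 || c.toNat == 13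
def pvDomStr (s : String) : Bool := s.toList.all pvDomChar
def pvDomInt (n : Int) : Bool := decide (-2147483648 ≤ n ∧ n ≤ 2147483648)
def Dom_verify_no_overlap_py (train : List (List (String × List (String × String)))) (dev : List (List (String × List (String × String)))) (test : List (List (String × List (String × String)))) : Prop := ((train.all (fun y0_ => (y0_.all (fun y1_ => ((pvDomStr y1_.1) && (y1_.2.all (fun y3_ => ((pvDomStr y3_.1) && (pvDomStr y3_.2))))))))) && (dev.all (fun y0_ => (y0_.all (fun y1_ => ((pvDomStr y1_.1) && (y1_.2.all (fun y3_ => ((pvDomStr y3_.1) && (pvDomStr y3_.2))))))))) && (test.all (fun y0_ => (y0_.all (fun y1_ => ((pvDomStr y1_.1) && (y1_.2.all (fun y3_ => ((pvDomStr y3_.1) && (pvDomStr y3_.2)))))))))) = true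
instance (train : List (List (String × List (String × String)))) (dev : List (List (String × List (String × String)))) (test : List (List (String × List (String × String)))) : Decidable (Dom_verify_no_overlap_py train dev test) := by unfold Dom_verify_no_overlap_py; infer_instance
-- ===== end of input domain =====

-- B replaces three per-split source sets plus three pairwise intersections by one
-- inverted index (source_path -> set of split names) and a single tally pass (objective: alternative).

-- ===== PORT A =====
-- item.get("meta", {}).get("source_path")  (shared by both ports, as in both Pythons)
def pvSrcKey (it : List (String × List (String × String))) : Option String :=
  PySem.Dict.get? (PySem.Dict.mk ((PySem.Dict.get? (PySem.Dict.mk it) "meta").getD [])) "source_path"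

def verify_no_overlap_py (train : List (List (String × List (String × String)))) (dev : List (List (String × List (String × String)))) (test : List (List (String × List (String × String)))) : List (String × Int) :=
  let train_sources : PySem.Set (Option String) := PySem.Set.ofList (train.map pvSrcKey)
  let dev_sources : PySem.Set (Option String) := PySem.Set.ofList (dev.map pvSrcKey)
  let test_sources : PySem.Set (Option String) := PySem.Set.ofList (test.map pvSrcKey)
  let train_dev_overlap : Int := (PySem.Set.inter train_sources dev_sources).length
  let train_test_overlap : Int := (PySem.Set.inter train_sources test_sources).length
  let dev_test_overlap : Int := (PySem.Set.inter dev_sources test_sources).length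
  [("train_dev_overlap", train_dev_overlap),
   ("train_test_overlap", train_test_overlap),
   ("dev_test_overlap", dev_test_overlap)]

-- ===== PORT B =====
def verify_no_overlap_py_alt (train : List (List (String × List (String × String)))) (dev : List (List (String × List (String × String)))) (test : List (List (String × List (String × String)))) : List (String × Int) :=
  -- for split, items in (("train", train), ("dev", dev), ("test", test)):
  --     for item in items: occ.setdefault(key, set()).add(split)
  let occ : PySem.Dict (Option String) (PySem.Set String) :=
    [("train", train), ("dev", dev), ("test", test)].foldl
      (fun occ p =>
        p.2.foldl (fun occ it =>
          occ.modify (pvSrcKey it) PySem.Set.empty (fun s => PySem.Set.add s p.1)) occ)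
      PySem.Dict.empty
  let c : Int × Int × Int :=
    occ.values.foldl (fun acc s =>
      (acc.1 + (if "train" ∈ s ∧ "dev" ∈ s then 1 else 0),
       acc.2.1 + (if "train" ∈ s ∧ "test" ∈ s then 1 else 0),
       acc.2.2 + (if "dev" ∈ s ∧ "test" ∈ s then 1 else 0))) ((0 : Int), (0 : Int), (0 : Int))
  [("train_dev_overlap", c.1),
   ("train_test_overlap", c.2.1),
   ("dev_test_overlap", c.2.2)]

-- ===== PRECONDITION & SPEC =====
def Spec_verify_no_overlap_py (train : List (List (String × List (String × String)))) (dev : List (List (String × List (String × String)))) (test : List (List (String × List (String × String)))) (out : List (String × Int)) : Prop := out = verify_no_overlap_py_alt train dev test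
instance (train : List (List (String × List (String × String)))) (dev : List (List (String × List (String × String)))) (test : List (List (String × List (String × String)))) (out : List (String × Int)) : Decidable (Spec_verify_no_overlap_py train dev test out) := by unfold Spec_verify_no_overlap_py; infer_instance

-- ===== CLAIM (what is proved, stated in full; the proofs are below) =====
def Claim_equal_verify_no_overlap_py : Prop := ∀ (train : List (List (String × List (String × String)))) (dev : List (List (String × List (String × String)))) (test : List (List (String × List (String × String)))), Dom_verify_no_overlap_py train dev test → Spec_verify_no_overlap_py train dev test (verify_no_overlap_py train dev test)

-- ===== LEMMAS AND PROOFS =====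
-- membership in a value of the inverted index after one split's loop
theorem pv_mem_getD_splitFold (items : List (List (String × List (String × String)))) (split : String)
    (occ : PySem.Dict (Option String) (PySem.Set String)) (k : Option String) (w : String) :
    (w ∈ (items.foldl (fun occ it =>
        occ.modify (pvSrcKey it) PySem.Set.empty (fun s => PySem.Set.add s split)) occ).getD k PySem.Set.empty)
    ↔ (w ∈ occ.getD k PySem.Set.empty ∨ (w = split ∧ k ∈ items.map pvSrcKey)) := by
  induction items generalizing occ with
  | nil => simp
  | cons it rest ih =>
    simp only [List.foldl_cons, ih, List.map_cons, List.mem_cons]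
    rw [PySem.Dict.getD_modify]
    by_cases hk : k = pvSrcKey it
    · simp [hk, PySem.Set.mem_add]; tauto
    · rw [if_neg hk]; tauto

-- the tally loop over the index's values is three countP's
theorem pv_tally (l : List (PySem.Set String)) (p1 p2 p3 : PySem.Set String → Prop)
    [DecidablePred p1] [DecidablePred p2] [DecidablePred p3] :
    l.foldl (fun acc s => (acc.1 + (if p1 s then (1:Int) else 0),
                           acc.2.1 + (if p2 s then (1:Int) else 0),
                           acc.2.2 + (if p3 s then (1:Int) else 0))) ((0:Int),(0:Int),(0:Int))
    = ((l.countP (fun s => decide (p1 s)) : Int), (l.countP (fun s => decide (p2 s)) : Int),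
       (l.countP (fun s => decide (p3 s)) : Int)) := by
  rw [PySem.List.foldl_prod_mk (f := fun a s => a + (if p1 s then (1:Int) else 0))
      (g := fun a s => (a.1 + (if p2 s then (1:Int) else 0), a.2 + (if p3 s then (1:Int) else 0)))]
  rw [PySem.List.foldl_prod_mk (f := fun a s => a + (if p2 s then (1:Int) else 0))
      (g := fun a s => a + (if p3 s then (1:Int) else 0))]
  rw [PySem.List.foldl_add, PySem.List.foldl_add, PySem.List.foldl_add]
  simp [pysem]

-- counting, over any Nodup key list covering A ∩ B, the keys in both A and B = |set(A) & set(B)|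
theorem pv_len_eq (keys A B : List (Option String)) (hnd : keys.Nodup)
    (hmem : ∀ k, k ∈ A ∧ k ∈ B → k ∈ keys) :
    ((keys.countP (fun k => decide (k ∈ A ∧ k ∈ B)) : Int))
      = ((PySem.Set.inter (PySem.Set.ofList A) (PySem.Set.ofList B)).length : Int) := by
  have hperm : (keys.filter (fun k => decide (k ∈ A ∧ k ∈ B))).Perm
      (PySem.Set.inter (PySem.Set.ofList A) (PySem.Set.ofList B)) := by
    rw [List.perm_ext_iff_of_nodup (List.Nodup.filter _ hnd)
        (PySem.Set.nodup_inter _ _ (PySem.Set.nodup_ofList A))]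
    intro x
    simp only [List.mem_filter, PySem.Set.mem_inter, PySem.Set.mem_ofList, decide_eq_true_eq]
    exact ⟨fun h => h.2, fun h => ⟨hmem x h, h⟩⟩
  rw [List.countP_eq_length_filter, hperm.length_eq]

-- ===== VERDICT (by name: the statement is the Claim_ definition above) =====
theorem verify_no_overlap_py_spec : Claim_equal_verify_no_overlap_py := by
  intro train dev test _
  unfold Spec_verify_no_overlap_py
  simp only [verify_no_overlap_py, verify_no_overlap_py_alt, List.foldl_cons, List.foldl_nil]
  -- name the inverted index
  set occ : PySem.Dict (Option String) (PySem.Set String) :=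
    test.foldl (fun occ it => occ.modify (pvSrcKey it) PySem.Set.empty (fun s => PySem.Set.add s "test"))
      (dev.foldl (fun occ it => occ.modify (pvSrcKey it) PySem.Set.empty (fun s => PySem.Set.add s "dev"))
        (train.foldl (fun occ it => occ.modify (pvSrcKey it) PySem.Set.empty (fun s => PySem.Set.add s "train"))
          PySem.Dict.empty)) with hocc
  have hkeys : occ.keys = PySem.Set.update (PySem.Set.update (PySem.Set.ofList (train.map pvSrcKey)) (dev.map pvSrcKey)) (test.map pvSrcKey) := by
    rw [hocc, PySem.Dict.keys_foldl_modify_key, PySem.Dict.keys_foldl_modify_key,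
        PySem.Dict.keys_foldl_modify_key, PySem.Dict.keys_empty, PySem.Set.update_nil_left]
  have hnd : occ.keys.Nodup := by
    rw [hkeys]
    exact PySem.Set.nodup_update _ _ (PySem.Set.nodup_update _ _ (PySem.Set.nodup_ofList _))
  have hkmem : ∀ k, k ∈ train.map pvSrcKey ∨ k ∈ dev.map pvSrcKey ∨ k ∈ test.map pvSrcKey → k ∈ occ.keys := by
    intro k hk; rw [hkeys]
    simp only [PySem.Set.mem_update, PySem.Set.mem_ofList]
    tauto
  have hval : ∀ (k : Option String) (w : String), w ∈ occ.getD k PySem.Set.empty ↔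
      ((w = "train" ∧ k ∈ train.map pvSrcKey) ∨ (w = "dev" ∧ k ∈ dev.map pvSrcKey) ∨
       (w = "test" ∧ k ∈ test.map pvSrcKey)) := by
    intro k w
    rw [hocc, pv_mem_getD_splitFold, pv_mem_getD_splitFold, pv_mem_getD_splitFold,
        PySem.Dict.getD_empty]
    simp only [PySem.Set.empty, List.not_mem_nil, false_or]
    tauto
  rw [PySem.Dict.values_eq_map_keys occ hnd PySem.Set.empty]
  rw [pv_tally]
  rw [List.countP_map, List.countP_map, List.countP_map]
  have hc1 : List.countP ((fun s => decide ("train" ∈ s ∧ "dev" ∈ s)) ∘ fun k => occ.getD k PySem.Set.empty) occ.keys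
      = List.countP (fun k => decide (k ∈ List.map pvSrcKey train ∧ k ∈ List.map pvSrcKey dev)) occ.keys := by
    apply List.countP_congr
    intro k _
    simp only [Function.comp_apply, decide_eq_true_eq]
    rw [hval, hval]
    simp
  have hc2 : List.countP ((fun s => decide ("train" ∈ s ∧ "test" ∈ s)) ∘ fun k => occ.getD k PySem.Set.empty) occ.keys
      = List.countP (fun k => decide (k ∈ List.map pvSrcKey train ∧ k ∈ List.map pvSrcKey test)) occ.keys := by
    apply List.countP_congr
    intro k _
    simp only [Function.comp_apply, decide_eq_true_eq]
    rw [hval, hval]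
    simp
  have hc3 : List.countP ((fun s => decide ("dev" ∈ s ∧ "test" ∈ s)) ∘ fun k => occ.getD k PySem.Set.empty) occ.keys
      = List.countP (fun k => decide (k ∈ List.map pvSrcKey dev ∧ k ∈ List.map pvSrcKey test)) occ.keys := by
    apply List.countP_congr
    intro k _
    simp only [Function.comp_apply, decide_eq_true_eq]
    rw [hval, hval]
    simp
  simp only [hc1, hc2, hc3]
  rw [pv_len_eq _ _ _ hnd (fun k h => hkmem k (Or.inl h.1)),
      pv_len_eq _ _ _ hnd (fun k h => hkmem k (Or.inl h.1)),
      pv_len_eq _ _ _ hnd (fun k h => hkmem k (Or.inr (Or.inl h.1)))]
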